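-- pv_equiv track=rewrite | github.com/paiml/depyler | examples/hard_lang_vm.py | stack_depth
-- ===== SOURCE A (Python) =====
-- from typing import List, Tuple
--
-- def stack_depth(code: List[int]) -> int:
--     depth: int = 0
--     max_depth: int = 0
--     for i in range(0, len(code), 2):
--         if code[i] == 1 or code[i] == 6:
--             depth = depth + 1
--         elif code[i] >= 2 and code[i] <= 5:
--             depth = depth - 1
--         if depth > max_depth:
--             max_depth = depth
--     return max_depth
-- ===== SOURCE B (Python) =====
-- def stack_depth(code):
--     # Divide-and-conquer over the even-indexed opcodes: each segment yields
--     # (total delta, max prefix depth floored at 0); segments combine by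
--     # (sL+sR, max(pL, sL+pR)).  Correct since the max prefix of a
--     # concatenation is either inside the left part or the left total plus a
--     # prefix of the right part; the floor at 0 is the empty prefix.
--     def delta(c):
--         return 1 if c == 1 or c == 6 else (-1 if 2 <= c <= 5 else 0)
--
--     def solve(lo, hi):
--         if hi - lo == 0:
--             return (0, 0)
--         if hi - lo == 1:
--             d = delta(code[2 * lo])
--             return (d, max(0, d))
--         mid = (lo + hi) // 2
--         sL, pL = solve(lo, mid)
--         sR, pR = solve(mid, hi)
--         return (sL + sR, max(pL, sL + pR))
--
--     n = (len(code) + 1) // 2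
--     return solve(0, n)[1]
-- ===== Notes on version B (the rewrite author's own statement) =====
-- stated objective: alternative
-- what changed: A's left-to-right loop carrying (depth, running max) is replaced by a divide-and-conquer over the even-indexed opcodes: each half returns (total delta, max prefix depth) and halves combine as (sL+sR, max(pL, sL+pR)).
import Mathlib
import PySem

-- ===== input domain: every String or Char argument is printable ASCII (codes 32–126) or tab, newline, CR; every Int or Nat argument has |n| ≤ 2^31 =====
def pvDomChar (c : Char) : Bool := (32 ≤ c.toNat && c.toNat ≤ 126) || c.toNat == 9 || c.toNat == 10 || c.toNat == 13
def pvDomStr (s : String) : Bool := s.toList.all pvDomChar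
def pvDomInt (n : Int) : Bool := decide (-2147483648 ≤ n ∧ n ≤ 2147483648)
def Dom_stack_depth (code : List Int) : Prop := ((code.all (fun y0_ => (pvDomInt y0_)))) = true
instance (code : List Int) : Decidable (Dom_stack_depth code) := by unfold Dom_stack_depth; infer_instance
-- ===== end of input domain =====

-- B replaces A's left-to-right running-max loop by a divide-and-conquer over the
-- even-indexed opcodes (each half yields (total delta, max prefix depth), combined
-- as (sL+sR, max(pL, sL+pR))); same values, objective: alternative algorithm.

-- ===== PORT A =====
def stack_depth (code : List Int) : Int :=
  (List.foldl
    (fun (st : Int × Int) (i : Int) =>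
      let c := PySem.List.pyGetD code i 0
      let depth := if c = 1 ∨ c = 6 then st.1 + 1
                   else if 2 ≤ c ∧ c ≤ 5 then st.1 - 1 else st.1
      (depth, if depth > st.2 then depth else st.2))
    (0, 0) (PySem.List.pyRange 0 (code.length : Int) 2)).2

-- ===== PORT B =====
def pvDelta (c : Int) : Int :=
  if c = 1 ∨ c = 6 then 1 else if 2 ≤ c ∧ c ≤ 5 then -1 else 0

def pvSolve (code : List Int) (lo hi : Nat) : Int × Int :=
  if hi - lo = 0 then (0, 0)
  else if hi - lo = 1 then
    let d := pvDelta (PySem.List.pyGetD code (2 * (lo : Int)) 0)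
    (d, max 0 d)
  else
    let mid := (lo + hi) / 2
    let L := pvSolve code lo mid
    let R := pvSolve code mid hi
    (L.1 + R.1, max L.2 (L.1 + R.2))
termination_by hi - lo
decreasing_by all_goals omega

def stack_depth_alt (code : List Int) : Int :=
  (pvSolve code 0 ((code.length + 1) / 2)).2

-- ===== PRECONDITION & SPEC =====
def Spec_stack_depth (code : List Int) (out : Int) : Prop := out = stack_depth_alt code
instance (code : List Int) (out : Int) : Decidable (Spec_stack_depth code out) := by unfold Spec_stack_depth; infer_instance

-- ===== CLAIM (what is proved, stated in full; the proofs are below) =====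
def Claim_equal_stack_depth : Prop := ∀ (code : List Int), Dom_stack_depth code → Spec_stack_depth code (stack_depth code)

-- ===== LEMMAS AND PROOFS =====

-- max prefix sum (the empty prefix included, hence floored at 0)
def pvMaxPref : List Int → Int
  | [] => 0
  | d :: ds => max 0 (d + pvMaxPref ds)

theorem pvMaxPref_nonneg (ds : List Int) : 0 ≤ pvMaxPref ds := by
  cases ds <;> simp [pvMaxPref]

theorem pvMaxPref_append (L R : List Int) :
    pvMaxPref (L ++ R) = max (pvMaxPref L) (L.sum + pvMaxPref R) := by
  induction L with
  | nil => have := pvMaxPref_nonneg R; simp [pvMaxPref]; omega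
  | cons d L ih =>
      simp only [List.cons_append, pvMaxPref, ih, List.sum_cons]
      omega

-- the delta list of the even-indexed opcodes from lo (inclusive) to hi
def pvSeg (code : List Int) (lo hi : Nat) : List Int :=
  (List.range' lo (hi - lo)).map (fun (k : Nat) => pvDelta (PySem.List.pyGetD code (2 * (k : Int)) 0))

theorem pvSolve_eq (code : List Int) : ∀ n lo hi, hi - lo = n →
    pvSolve code lo hi = ((pvSeg code lo hi).sum, pvMaxPref (pvSeg code lo hi)) := by
  intro n
  induction n using Nat.strong_induction_on with
  | _ n ih =>
    intro lo hi hn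
    rw [pvSolve]
    by_cases h0 : hi - lo = 0
    · simp [h0, pvSeg, pvMaxPref]
    · by_cases h1 : hi - lo = 1
      · simp [h1, pvSeg, pvMaxPref]
      · have hlo : lo < (lo + hi) / 2 := by omega
        have hhi : (lo + hi) / 2 < hi := by omega
        have hL := ih ((lo + hi) / 2 - lo) (by omega) lo ((lo + hi) / 2) rfl
        have hR := ih (hi - (lo + hi) / 2) (by omega) ((lo + hi) / 2) hi rfl
        rw [if_neg h0, if_neg h1]
        simp only [hL, hR]
        have hr : List.range' lo (hi - lo)
            = List.range' lo ((lo + hi) / 2 - lo) ++ List.range' ((lo + hi) / 2) (hi - (lo + hi) / 2) := by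
          rw [show hi - lo = ((lo + hi) / 2 - lo) + (hi - (lo + hi) / 2) by omega,
              ← List.range'_append_1]
          congr 2
          omega
        have hsplit : pvSeg code lo hi = pvSeg code lo ((lo + hi) / 2) ++ pvSeg code ((lo + hi) / 2) hi := by
          unfold pvSeg
          rw [hr, List.map_append]
        rw [hsplit, List.sum_append, pvMaxPref_append]

-- A's loop body on a delta (proof-side abbreviation)
def pvStep (st : Int × Int) (d : Int) : Int × Int :=
  (st.1 + d, if st.1 + d > st.2 then st.1 + d else st.2)

-- A's fold invariant: running max over prefix sums
theorem pvFoldA (ds : List Int) : ∀ (t m : Int), t ≤ m →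
    (ds.foldl pvStep (t, m)).2 = max m (t + pvMaxPref ds) := by
  induction ds with
  | nil => intro t m h; simp [pvMaxPref]; omega
  | cons d ds ih =>
      intro t m h
      have hnn := pvMaxPref_nonneg ds
      simp only [List.foldl_cons, pvMaxPref, pvStep]
      rw [show (if t + d > m then t + d else m) = max m (t + d) by split <;> omega]
      rw [ih (t + d) (max m (t + d)) (by omega)]
      omega

-- the even-index range, as a plain Nat range
theorem pvRange_even (n : Nat) :
    PySem.List.pyRange 0 (n : Int) 2
      = (List.range ((n + 1) / 2)).map (fun k : Nat => 2 * (k : Int)) := by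
  rw [PySem.List.pyRange_of_pos 0 (n : Int) (by norm_num)]
  have hcnt : (if (0 : Int) < (n : Int) then (((n : Int) - 0 + 2 - 1) / 2).toNat else 0)
      = (n + 1) / 2 := by split <;> omega
  rw [hcnt]
  simp only [zero_add]

-- ===== VERDICT (by name: the statement is the Claim_ definition above) =====
theorem stack_depth_spec : Claim_equal_stack_depth := by
  intro code _
  show stack_depth code = stack_depth_alt code
  unfold stack_depth stack_depth_alt
  rw [pvSolve_eq code ((code.length + 1) / 2) 0 ((code.length + 1) / 2) rfl]
  rw [pvRange_even, List.foldl_map]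
  have hstep : ∀ (st : Int × Int), ∀ k ∈ List.range ((code.length + 1) / 2),
      (fun (st : Int × Int) (i : Int) =>
        let c := PySem.List.pyGetD code i 0
        let depth := if c = 1 ∨ c = 6 then st.1 + 1
                     else if 2 ≤ c ∧ c ≤ 5 then st.1 - 1 else st.1
        (depth, if depth > st.2 then depth else st.2)) st (2 * (k : Int))
      = pvStep st (pvDelta (PySem.List.pyGetD code (2 * (k : Int)) 0)) := by
    intro st k _
    simp only [pvDelta, pvStep]
    split_ifs <;> simp <;> omega
  rw [PySem.List.foldl_congr_mem _ _ _ _ hstep, ← List.foldl_map, pvFoldA _ 0 0 le_rfl]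
  have hseg : pvSeg code 0 ((code.length + 1) / 2)
      = (List.range ((code.length + 1) / 2)).map
          (fun (k : Nat) => pvDelta (PySem.List.pyGetD code (2 * (k : Int)) 0)) := by
    simp [pvSeg, List.range_eq_range']
  rw [hseg]
  have hnn := pvMaxPref_nonneg ((List.range ((code.length + 1) / 2)).map
          (fun (k : Nat) => pvDelta (PySem.List.pyGetD code (2 * (k : Int)) 0)))
  dsimp only
  omega
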